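-- pv_equiv track=rewrite | github.com/TomasAliberti07/iSAUi-programacion | ejercicio10.py | tablero
-- ===== SOURCE A (Python) =====
-- def tablero(palabra, letra_adivinada):#Defino la funcion tablero
--     mostrar_palabra = ""
--     for letra in palabra:#Va a iterar por cada letra de la palabra
--         if letra in letra_adivinada:#Si la letra se encuentra en las letras de la palabra
--             mostrar_palabra += letra #Muestra la letra en el tablero
--         else:
--             mostrar_palabra += "_"#Si no esta queda el espacio vacio
--     return mostrar_palabra#Devuelve en el caso de if o else
-- ===== SOURCE B (Python) =====
-- def tablero(palabra, letra_adivinada):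
--     pos = {}
--     for i, c in enumerate(palabra):
--         pos.setdefault(c, []).append(i)
--     res = ['_'] * len(palabra)
--     for g in dict.fromkeys(letra_adivinada):
--         for i in pos.get(g, []):
--             res[i] = g
--     return ''.join(res)
-- ===== Notes on version B (the rewrite author's own statement) =====
-- stated objective: alternative
-- what changed: B builds a positions index (char -> list of indices) from the word in one pass, then marks the indexed positions of each distinct guessed letter on an all-underscore board, instead of deciding each board slot by a membership test of the word's letter in the guess string.
import Mathlib
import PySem

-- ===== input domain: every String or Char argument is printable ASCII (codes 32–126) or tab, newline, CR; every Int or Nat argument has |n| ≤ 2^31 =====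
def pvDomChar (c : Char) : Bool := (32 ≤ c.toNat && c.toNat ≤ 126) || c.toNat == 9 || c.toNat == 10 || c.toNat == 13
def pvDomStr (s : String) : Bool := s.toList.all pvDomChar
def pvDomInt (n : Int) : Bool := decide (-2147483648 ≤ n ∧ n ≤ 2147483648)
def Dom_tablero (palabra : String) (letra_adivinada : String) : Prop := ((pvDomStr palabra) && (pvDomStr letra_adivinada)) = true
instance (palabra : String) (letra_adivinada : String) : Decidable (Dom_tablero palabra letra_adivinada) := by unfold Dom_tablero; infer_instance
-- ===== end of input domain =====

-- B replaces A's per-position membership scan over the guesses by a positions index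
-- (char -> list of indices) built once from the word, then marks the indexed positions
-- of each guessed letter on an all-underscore board (objective: alternative decomposition).

-- ===== PORT A =====
-- A: accumulate mostrar_palabra over the letters of palabra, appending the letter
-- if it occurs in letra_adivinada, else '_'.
def tablero (palabra : String) (letra_adivinada : String) : String :=
  String.ofList (palabra.toList.foldl
    (fun acc letra => acc ++ (if letra ∈ letra_adivinada.toList then [letra] else ['_'])) [])

-- ===== PORT B =====
-- B: pos = {}; for i, c in enumerate(palabra): pos.setdefault(c, []).append(i)
--    res = ['_'] * len(palabra)
--    for g in dict.fromkeys(letra_adivinada):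
--        for i in pos.get(g, []): res[i] = g
--    return ''.join(res)
-- Indices produced by enumerate are ≥ 0, so `.toNat` on them is exact.
def tablero_alt (palabra : String) (letra_adivinada : String) : String :=
  let pos : PySem.Dict Char (List Int) :=
    (PySem.List.enumerate palabra.toList 0).foldl
      (fun d p => d.modify p.2 [] (fun l => l ++ [p.1])) PySem.Dict.empty
  String.ofList ((PySem.List.dedup letra_adivinada.toList).foldl
    (fun res g => (pos.getD g []).foldl (fun r i => r.set i.toNat g) res)
    (List.replicate palabra.toList.length '_'))

-- ===== PRECONDITION & SPEC =====
def Spec_tablero (palabra : String) (letra_adivinada : String) (out : String) : Prop := out = tablero_alt palabra letra_adivinada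
instance (palabra : String) (letra_adivinada : String) (out : String) : Decidable (Spec_tablero palabra letra_adivinada out) := by unfold Spec_tablero; infer_instance

-- ===== CLAIM (what is proved, stated in full; the proofs are below) =====
def Claim_equal_tablero : Prop := ∀ (palabra : String) (letra_adivinada : String), Dom_tablero palabra letra_adivinada → Spec_tablero palabra letra_adivinada (tablero palabra letra_adivinada)

-- ===== LEMMAS AND PROOFS =====

-- The list of positions of c in w, as B's index construction produces it.
def pvIdx (w : List Char) (c : Char) : List Int :=
  ((PySem.List.enumerate w 0).filter (fun p => p.2 == c)).map (·.1)

-- B's dict build: looking up c yields exactly the positions of c in the word.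
theorem idx_spec (w : List Char) (c : Char) :
    ((PySem.List.enumerate w 0).foldl
      (fun d p => d.modify p.2 [] (fun l => l ++ [p.1])) PySem.Dict.empty).getD c []
    = pvIdx w c := by
  have h := PySem.Dict.getD_foldl_modify_append
    ((PySem.List.enumerate w 0).map Prod.swap) (PySem.Dict.empty (κ := Char) (ν := List Int)) c
  rw [List.foldl_map] at h
  simpa [pvIdx, List.filter_map, List.map_map, Function.comp_def] using h

theorem mem_idx (w : List Char) (c : Char) (i : Int) :
    i ∈ pvIdx w c ↔ ∃ k : Nat, ∃ h : k < w.length, w[k] = c ∧ i = (k : Int) := by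
  simp only [pvIdx, List.mem_map, List.mem_filter, PySem.List.mem_enumerate_iff]
  constructor
  · rintro ⟨p, ⟨⟨k, hk, rfl⟩, hc⟩, rfl⟩
    exact ⟨k, hk, by simpa using hc, by simp⟩
  · rintro ⟨k, hk, hc, rfl⟩
    exact ⟨((k : Int), w[k]), ⟨⟨k, hk, by simp⟩, by simpa using hc⟩, rfl⟩

-- Setting g at every index of a list of nonnegative positions, pointwise.
theorem setAll_getElem? (g : Char) (is : List Int) (hnn : ∀ i ∈ is, 0 ≤ i)
    (res : List Char) (j : Nat) :
    (is.foldl (fun r i => r.set i.toNat g) res)[j]?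
      = if (j : Int) ∈ is then (if j < res.length then some g else none) else res[j]? := by
  induction is generalizing res with
  | nil => simp
  | cons i t ih =>
      have hi : 0 ≤ i := hnn i (List.mem_cons_self ..)
      rw [List.foldl_cons, ih (fun x hx => hnn x (List.mem_cons_of_mem _ hx))]
      by_cases hjt : (j : Int) ∈ t
      · simp [hjt]
      · by_cases hji : (j : Int) = i
        · have h1 : i.toNat = j := by omega
          simp [hji, h1, List.getElem?_set]
        · have h1 : i.toNat ≠ j := by omega
          simp [hjt, hji, h1]

-- One guess g on a board that is a pointwise function of the word.
theorem step_map (w : List Char) (g : Char) (f : Char → Char) :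
    (pvIdx w g).foldl (fun r i => r.set i.toNat g) (w.map f)
      = w.map (fun c => if c = g then c else f c) := by
  apply List.ext_getElem?
  intro j
  have hnn : ∀ i ∈ pvIdx w g, 0 ≤ i := by
    intro i hi; rcases (mem_idx w g i).1 hi with ⟨k, _, _, rfl⟩; positivity
  rw [setAll_getElem? g _ hnn]
  by_cases hj : j < w.length
  · by_cases hm : (j : Int) ∈ pvIdx w g
    · rcases (mem_idx w g _).1 hm with ⟨k, hk, hkc, hkj⟩
      have hkj' : k = j := by omega
      subst hkj'
      simp [hm, hj, hkc]
    · have hne : ¬ w[j] = g := by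
        intro h; exact hm ((mem_idx w g _).2 ⟨j, hj, h, rfl⟩)
      simp [hm, List.getElem?_eq_getElem hj, hne]
  · have hm : ¬ (j : Int) ∈ pvIdx w g := by
      intro h; rcases (mem_idx w g _).1 h with ⟨k, hk, _, hkj⟩; omega
    simp [hm, List.getElem?_eq_none_iff.2 (by simpa using Nat.le_of_not_lt hj)]

-- B's whole outer fold: starting from the board revealing exactly the letters
-- satisfying P, processing the guesses gs reveals exactly P ∨ membership in gs.
theorem fold_invariant (gs : List Char) (w : List Char) (P : Char → Bool) :
    gs.foldl (fun res g => (pvIdx w g).foldl (fun r i => r.set i.toNat g) res)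
      (w.map (fun c => if P c then c else '_'))
    = w.map (fun c => if (P c || c ∈ gs) then c else '_') := by
  induction gs generalizing P with
  | nil => simp
  | cons g t ih =>
      simp only [List.foldl_cons]
      rw [step_map w g (fun c => if P c then c else '_')]
      have h1 : (w.map (fun c => if c = g then c else if P c then c else '_'))
           = w.map (fun c => if (P c || c = g) then c else '_') := by
        apply List.map_congr_left; intro c _
        by_cases h1 : c = g <;> by_cases h2 : P c <;> simp [h1, h2]
      rw [h1, ih]
      apply List.map_congr_left; intro c _
      by_cases h1 : c = g <;> by_cases h2 : P c <;> simp [h1, h2]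

-- ===== VERDICT (by name: the statement is the Claim_ definition above) =====
theorem tablero_spec : Claim_equal_tablero := by
  intro palabra letra_adivinada _
  unfold Spec_tablero tablero tablero_alt
  have hA : (fun (acc : List Char) (letra : Char) => acc ++ if letra ∈ letra_adivinada.toList then [letra] else ['_'])
      = fun acc letra => acc ++ [if letra ∈ letra_adivinada.toList then letra else '_'] := by
    funext acc letra; split <;> rfl
  rw [hA, PySem.List.foldl_append_singleton_eq_map]
  simp only [idx_spec]
  have hrep : List.replicate palabra.toList.length '_'
       = palabra.toList.map (fun c => if (false : Bool) then c else '_') := by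
    simp [List.map_const']
  rw [hrep, fold_invariant]
  simp only [List.nil_append]
  congr 1
  apply List.map_congr_left; intro c _
  simp [PySem.List.mem_dedup]
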